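-- pv_equiv track=rewrite | github.com/alex17-sys/stdlib-sniper | snippets_py/data_structures/lists/list_transpose_matrix_demo.py | transpose_matrix_with_fill
-- ===== SOURCE A (Python) =====
-- def transpose_matrix_with_fill(matrix, fill_value=None):
--     """Transpose matrix with fill value for irregular shapes."""
--     if not matrix:
--         return []
--
--     # Find maximum row length
--     max_cols = max(len(row) for row in matrix)
--
--     # Pad shorter rows with fill value
--     padded_matrix = []
--     for row in matrix:
--         padded_row = row + [fill_value] * (max_cols - len(row))
--         padded_matrix.append(padded_row)
--
--     # Transpose the padded matrix
--     return list(map(list, zip(*padded_matrix)))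
-- ===== SOURCE B (Python) =====
-- def transpose_matrix_with_fill(matrix, fill_value=None):
--     """Transpose matrix with fill value for irregular shapes."""
--     if not matrix:
--         return []
--     max_cols = max(len(row) for row in matrix)
--     return [[row[j] if j < len(row) else fill_value for row in matrix]
--             for j in range(max_cols)]
-- ===== Notes on version B (the rewrite author's own statement) =====
-- stated objective: simpler
-- what changed: B computes each output cell directly with a bounds check (row[j] if j < len(row) else fill_value) in one nested comprehension over column indices, eliminating A's intermediate padded matrix and the zip(*)-based transpose.
import Mathlib
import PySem

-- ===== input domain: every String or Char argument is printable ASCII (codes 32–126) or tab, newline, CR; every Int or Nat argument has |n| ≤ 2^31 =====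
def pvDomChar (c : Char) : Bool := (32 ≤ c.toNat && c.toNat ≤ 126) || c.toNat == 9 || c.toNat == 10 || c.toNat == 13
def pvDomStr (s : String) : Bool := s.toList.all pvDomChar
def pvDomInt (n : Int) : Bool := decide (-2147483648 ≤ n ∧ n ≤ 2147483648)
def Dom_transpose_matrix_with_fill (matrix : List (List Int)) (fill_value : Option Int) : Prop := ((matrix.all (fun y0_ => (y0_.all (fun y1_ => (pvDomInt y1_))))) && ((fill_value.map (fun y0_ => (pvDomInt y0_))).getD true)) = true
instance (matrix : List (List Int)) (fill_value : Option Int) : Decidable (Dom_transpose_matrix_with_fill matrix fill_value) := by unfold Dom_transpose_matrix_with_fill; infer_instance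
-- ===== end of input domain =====

-- B computes each output cell directly with a bounds check inside one nested pass over
-- column indices, instead of A's padding pass followed by a zip(*)-style transpose: simpler.

-- ===== PORT A =====

-- max(len(row) for row in matrix): fold of max over the row lengths (all lengths ≥ 0,
-- so starting the fold at 0 yields Python's max of the nonempty sequence).
def pvMaxCols (matrix : List (List Int)) : Nat :=
  matrix.foldl (fun a r => max a r.length) 0

-- zip(*padded): emit the heads and recurse on the tails until some list is exhausted.
-- fuel only bounds the recursion (it is called with the common row length); the
-- isEmpty test is what actually stops it, exactly like Python's zip.
def pvZipStar (fuel : Nat) (m : List (List (Option Int))) : List (List (Option Int)) :=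
  match fuel with
  | 0 => []
  | f + 1 =>
    if m.isEmpty ∨ m.any List.isEmpty then []
    else (m.map (fun l => l.headD none)) :: pvZipStar f (m.map List.tail)

def transpose_matrix_with_fill (matrix : List (List Int)) (fill_value : Option Int) : List (List (Option Int)) :=
  if matrix = [] then []
  else
    let max_cols := pvMaxCols matrix
    -- padded_row = row + [fill_value] * (max_cols - len(row))
    let padded_matrix := matrix.map (fun row => row.map some ++ List.replicate (max_cols - row.length) fill_value)
    pvZipStar max_cols padded_matrix

-- ===== PORT B =====
def transpose_matrix_with_fill_alt (matrix : List (List Int)) (fill_value : Option Int) : List (List (Option Int)) :=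
  if matrix = [] then []
  else
    let max_cols := pvMaxCols matrix
    (List.range max_cols).map (fun j =>
      matrix.map (fun row => if h : j < row.length then some row[j] else fill_value))

-- ===== PRECONDITION & SPEC =====
def Spec_transpose_matrix_with_fill (matrix : List (List Int)) (fill_value : Option Int) (out : List (List (Option Int))) : Prop := out = transpose_matrix_with_fill_alt matrix fill_value
instance (matrix : List (List Int)) (fill_value : Option Int) (out : List (List (Option Int))) : Decidable (Spec_transpose_matrix_with_fill matrix fill_value out) := by unfold Spec_transpose_matrix_with_fill; infer_instance

-- ===== CLAIM (what is proved, stated in full; the proofs are below) =====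
def Claim_equal_transpose_matrix_with_fill : Prop := ∀ (matrix : List (List Int)) (fill_value : Option Int), Dom_transpose_matrix_with_fill matrix fill_value → Spec_transpose_matrix_with_fill matrix fill_value (transpose_matrix_with_fill matrix fill_value)

-- ===== LEMMAS AND PROOFS =====

-- the fold's accumulator only grows
theorem foldl_max_init_le (l : List (List Int)) (init : Nat) :
    init ≤ l.foldl (fun a x => max a x.length) init := by
  induction l generalizing init with
  | nil => simp
  | cons hd tl ih => exact le_trans (le_max_left _ _) (ih _)

-- every row length is bounded by the fold-of-max
theorem len_le_pvMaxCols_aux (l : List (List Int)) (r : List Int) (h : r ∈ l) :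
    ∀ init, r.length ≤ l.foldl (fun a x => max a x.length) init := by
  induction h with
  | head as => exact fun init => le_trans (le_max_right init _) (foldl_max_init_le as _)
  | tail b hb ih => exact fun init => ih _

theorem len_le_pvMaxCols (matrix : List (List Int)) (r : List Int) (h : r ∈ matrix) :
    r.length ≤ pvMaxCols matrix := len_le_pvMaxCols_aux matrix r h 0

-- pvZipStar on a nonempty list of rows, all of length n, with fuel n, is the
-- column-indexed map.
theorem pvZipStar_eq_cols (n : Nat) (m : List (List (Option Int)))
    (hne : m ≠ []) (hlen : ∀ r ∈ m, r.length = n) :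
    pvZipStar n m = (List.range n).map (fun j => m.map (fun r => r.getD j none)) := by
  induction n generalizing m with
  | zero =>
    cases m with
    | nil => exact absurd rfl hne
    | cons hd tl =>
      have : hd = [] := List.eq_nil_of_length_eq_zero (hlen hd (by simp))
      simp [pvZipStar]
  | succ k ih =>
    have hany : ¬ (m.isEmpty = true ∨ m.any List.isEmpty = true) := by
      rintro (h | h)
      · rw [List.isEmpty_iff] at h; exact hne h
      · rcases List.any_eq_true.mp h with ⟨x, hx, hxe⟩
        have := hlen x hx
        rw [List.isEmpty_iff] at hxe
        simp [hxe] at this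
    rw [pvZipStar, if_neg hany]
    have htl : ∀ r ∈ m.map List.tail, r.length = k := by
      intro r hr
      rcases List.mem_map.mp hr with ⟨x, hx, rfl⟩
      have := hlen x hx
      simp [List.length_tail, this]
    have htlne : m.map List.tail ≠ [] := by
      intro h; exact hne (List.map_eq_nil_iff.mp h)
    rw [ih (m.map List.tail) htlne htl]
    rw [List.range_succ_eq_map]
    simp only [List.map_cons, List.map_map]
    have hrow : ∀ r ∈ m, r ≠ [] := by
      intro r hr h0
      have := hlen r hr; simp [h0] at this
    simp only [List.cons.injEq]
    constructor
    · apply List.map_congr_left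
      intro r hr
      rcases r with _ | ⟨a, t⟩
      · exact absurd rfl (hrow _ hr)
      · simp [List.getD]
    · apply List.map_congr_left
      intro j _
      simp only [Function.comp]
      apply List.map_congr_left
      intro r hr
      rcases r with _ | ⟨a, t⟩
      · exact absurd rfl (hrow _ hr)
      · simp [List.getD]

theorem getD_pad (n : Nat) (row : List Int) (fill : Option Int) (j : Nat)
    (hle : row.length ≤ n) (hj : j < n) :
    (row.map some ++ List.replicate (n - row.length) fill).getD j none
      = if h : j < row.length then some row[j] else fill := by
  by_cases h : j < row.length
  · simp [List.getD, List.getElem?_append_left, h, List.getElem?_eq_getElem,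
      (by simpa using h : j < (row.map some).length)]
  · rw [not_lt] at h
    have h2 : j - (List.map some row).length < n - row.length := by simp; omega
    rw [List.getD, List.getElem?_append_right (by simpa using h), List.getElem?_replicate,
      if_pos h2, dif_neg (not_lt.mpr h)]
    rfl

-- ===== VERDICT (by name: the statement is the Claim_ definition above) =====
theorem transpose_matrix_with_fill_spec : Claim_equal_transpose_matrix_with_fill := by
  intro matrix fill_value _
  unfold Spec_transpose_matrix_with_fill
  by_cases hm : matrix = []
  · simp [transpose_matrix_with_fill, transpose_matrix_with_fill_alt, hm]
  · simp only [transpose_matrix_with_fill, transpose_matrix_with_fill_alt, if_neg hm]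
    rw [pvZipStar_eq_cols (pvMaxCols matrix) _ (by simpa using hm) ?hlen]
    case hlen =>
      intro r hr
      rcases List.mem_map.mp hr with ⟨row, hrow, rfl⟩
      have := len_le_pvMaxCols matrix row hrow
      simp; omega
    apply List.map_congr_left
    intro j hj
    rw [List.map_map]
    apply List.map_congr_left
    intro row hrow
    exact getD_pad _ row fill_value j (len_le_pvMaxCols matrix row hrow) (List.mem_range.mp hj)
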